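-- pv_equiv track=rewrite | github.com/alxgmpr/lutron-tools | rf/analysis/analyze_pairing_v2.py | find_preamble
-- ===== SOURCE A (Python) =====
-- def find_preamble(bits):
--     """Find preamble (alternating pattern) and return position after it."""
--     best_pos = 0
--     best_run = 0
--
--     for i in range(len(bits) - 16):
--         run = 0
--         for j in range(min(64, len(bits) - i)):
--             expected = (bits[i] + j) % 2
--             if bits[i + j] == expected:
--                 run += 1
--             else:
--                 break
--         if run > best_run:
--             best_run = run
--             best_pos = i
--
--     return best_pos, best_run
-- ===== SOURCE B (Python) =====
-- def find_preamble(bits):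
--     """Find preamble (alternating pattern) and return position after it."""
--     n = len(bits)
--     # suffix run lengths: runs[i] = length of the alternating 0/1 run starting at i
--     runs = [0] * n
--     for i in range(n - 1, -1, -1):
--         b = bits[i]
--         if b == 0 or b == 1:
--             runs[i] = 1 + (runs[i + 1] if i + 1 < n and bits[i + 1] == 1 - b else 0)
--     best_pos = 0
--     best_run = 0
--     for i in range(n - 16):
--         run = min(runs[i], 64)
--         if run > best_run:
--             best_run = run
--             best_pos = i
--     return best_pos, best_run
-- ===== Notes on version B (the rewrite author's own statement) =====
-- stated objective: faster
-- what changed: Replace the per-position 64-step inner rescan by a right-to-left suffix run-length DP (runs[i] = 1 + runs[i+1] when the alternation continues), then a single scan takes min(runs[i],64) for the earliest maximum.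
import Mathlib
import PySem

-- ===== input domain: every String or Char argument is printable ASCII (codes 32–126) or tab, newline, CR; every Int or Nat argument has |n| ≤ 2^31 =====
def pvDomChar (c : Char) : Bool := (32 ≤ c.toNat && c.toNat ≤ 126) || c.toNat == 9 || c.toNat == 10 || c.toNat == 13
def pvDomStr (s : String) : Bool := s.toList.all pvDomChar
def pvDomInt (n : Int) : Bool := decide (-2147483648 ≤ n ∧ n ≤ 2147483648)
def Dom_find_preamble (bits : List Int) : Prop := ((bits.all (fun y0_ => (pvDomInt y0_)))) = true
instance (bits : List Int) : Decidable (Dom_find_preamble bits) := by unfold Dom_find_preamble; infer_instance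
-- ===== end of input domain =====

-- B replaces A's 64-step rescan at every position by a right-to-left suffix run-length DP plus one scan (measured faster, constant factor).


-- ===== PORT A =====
-- inner 'for j in range(min(64, len(bits)-i))' loop with its break; '%' on Int with
-- positive modulus 2 coincides with Python's '%'; indices i+j are always in range
-- (j < min(64, n-i)), so List.getD is exact here.
def innerA (bits : List Int) (b : Int) (i j : Nat) (fuel : Nat) (run : Int) : Int :=
  match fuel with
  | 0 => run
  | f + 1 =>
    if bits.getD (i + j) 0 = (b + (j : Int)) % 2 then
      innerA bits b i (j + 1) f (run + 1)
    else run

def find_preamble (bits : List Int) : Int × Int :=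
  let n := bits.length
  (List.range (n - 16)).foldl
    (fun st i =>
      let run := innerA bits (bits.getD i 0) i 0 (min 64 (n - i)) 0
      if st.2 < run then ((i : Int), run) else st)
    (0, 0)

-- ===== PORT B =====
-- suffix run lengths, built right to left (structural recursion = B's descending loop)
def suffRuns : List Int → List Int
  | [] => []
  | b :: rest =>
    let rs := suffRuns rest
    let r : Int :=
      if b = 0 ∨ b = 1 then
        1 + (match rest with
             | c :: _ => if c = 1 - b then rs.headD 0 else 0
             | [] => 0)
      else 0
    r :: rs

def find_preamble_alt (bits : List Int) : Int × Int :=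
  let n := bits.length
  let runs := suffRuns bits
  (List.range (n - 16)).foldl
    (fun st i =>
      let run := min (runs.getD i 0) 64
      if st.2 < run then ((i : Int), run) else st)
    (0, 0)

-- ===== PRECONDITION & SPEC =====
def Spec_find_preamble (bits : List Int) (out : Int × Int) : Prop := out = find_preamble_alt bits
instance (bits : List Int) (out : Int × Int) : Decidable (Spec_find_preamble bits out) := by unfold Spec_find_preamble; infer_instance

-- ===== CLAIM (what is proved, stated in full; the proofs are below) =====
def Claim_equal_find_preamble : Prop := ∀ (bits : List Int), Dom_find_preamble bits → Spec_find_preamble bits (find_preamble bits)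

-- ===== LEMMAS AND PROOFS =====

/-- uncapped alternating-run length of a suffix (head of B's DP list). -/
def Rr (l : List Int) : Int := (suffRuns l).headD 0

@[simp] lemma Rr_nil : Rr [] = 0 := rfl

lemma Rr_cons_nil (x : Int) : Rr [x] = if x = 0 ∨ x = 1 then 1 else 0 := by
  unfold Rr suffRuns; split <;> norm_num

lemma Rr_cons_cons (x c : Int) (rest : List Int) :
    Rr (x :: c :: rest) =
      if x = 0 ∨ x = 1 then 1 + (if c = 1 - x then Rr (c :: rest) else 0) else 0 := rfl

lemma Rr_bounds (l : List Int) : 0 ≤ Rr l ∧ Rr l ≤ (l.length : Int) := by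
  induction l with
  | nil => simp
  | cons x xs ih =>
    cases xs with
    | nil => rw [Rr_cons_nil]; split <;> simp
    | cons c rest =>
      rw [Rr_cons_cons]
      simp only [List.length_cons] at *
      split
      · split
        · push_cast; omega
        · exact ⟨by norm_num, by push_cast; omega⟩
      · exact ⟨by norm_num, by push_cast; omega⟩

lemma suffRuns_getD (l : List Int) (i : Nat) : (suffRuns l).getD i 0 = Rr (l.drop i) := by
  induction l generalizing i with
  | nil => simp [suffRuns]
  | cons x xs ih =>
    cases i with
    | zero => rfl
    | succ i => simpa [suffRuns] using ih i

/-- specification counter: matches of the expected alternating value, with fuel. -/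
def cnt : List Int → Int → Nat → Int
  | _, _, 0 => 0
  | [], _, _ + 1 => 0
  | x :: xs, e, k + 1 => if x = e then cnt xs ((e + 1) % 2) k + 1 else 0

@[simp] lemma cnt_nil (e : Int) (k : Nat) : cnt [] e k = 0 := by cases k <;> rfl

lemma cnt_head_ne {x e : Int} (xs : List Int) (h : x ≠ e) (k : Nat) :
    cnt (x :: xs) e k = 0 := by cases k <;> simp [cnt, h]

lemma cnt_eq (l : List Int) (k : Nat) :
    cnt l (l.headD 0 % 2) k = min (k : Int) (Rr l) := by
  induction l generalizing k with
  | nil => simp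
  | cons x xs ih =>
    cases k with
    | zero =>
      have := (Rr_bounds (x :: xs)).1
      simp [cnt]; omega
    | succ k =>
      by_cases hx : x = 0 ∨ x = 1
      · have hxe : x % 2 = x := by omega
        simp only [List.headD_cons, cnt, hxe]
        cases xs with
        | nil =>
          rw [Rr_cons_nil, if_pos hx]
          simp only [cnt_nil]
          push_cast; omega
        | cons c rest =>
          rw [Rr_cons_cons, if_pos hx]
          by_cases hc : c = 1 - x
          · have hce : (x + 1) % 2 = c % 2 := by omega
            rw [hce]
            have ihc := ih k
            rw [List.headD_cons] at ihc
            rw [ihc, if_pos hc]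
            have := (Rr_bounds (c :: rest)).1
            push_cast; omega
          · have hne : c ≠ (x + 1) % 2 := by omega
            rw [cnt_head_ne rest hne k, if_neg hc]
            push_cast; omega
      · have hxe : x ≠ x % 2 := by omega
        rw [cnt_head_ne xs (by omega) (k+1)]
        cases xs with
        | nil => rw [Rr_cons_nil, if_neg hx]; push_cast; omega
        | cons c rest => rw [Rr_cons_cons, if_neg hx]; push_cast; omega

lemma innerA_cnt (fuel : Nat) (bits : List Int) (i : Nat) :
    ∀ (j : Nat) (b run : Int), i + j + fuel ≤ bits.length →
      innerA bits b i j fuel run = run + cnt (bits.drop (i + j)) ((b + (j : Int)) % 2) fuel := by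
  induction fuel with
  | zero => intro j b run h; simp [innerA, cnt]
  | succ f ih =>
    intro j b run h
    have hij : i + j < bits.length := by omega
    have hdrop : bits.drop (i + j) = bits[i + j] :: bits.drop (i + j + 1) :=
      List.drop_eq_getElem_cons hij
    have hgd : bits.getD (i + j) 0 = bits[i + j] := List.getD_eq_getElem _ _ hij
    rw [innerA, hdrop]
    by_cases hc : bits[i + j] = (b + (j : Int)) % 2
    · rw [if_pos (hgd ▸ hc), ih (j + 1) b (run + 1) (by omega)]
      have h2 : ((b + (j : Int)) % 2 + 1) % 2 = (b + ((j : Nat) + 1 : Int)) % 2 := by omega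
      have h3 : i + (j + 1) = i + j + 1 := by omega
      simp only [cnt, if_pos hc, h3]
      push_cast
      rw [h2]
      ring
    · rw [if_neg (hgd ▸ hc)]
      simp [cnt, hc]

lemma headD_drop (l : List Int) (i : Nat) (h : i < l.length) :
    (l.drop i).headD 0 = l.getD i 0 := by
  rw [List.drop_eq_getElem_cons h, List.getD_eq_getElem _ _ h]; rfl

lemma run_eq (bits : List Int) (i : Nat) (hi : i < bits.length - 16) :
    innerA bits (bits.getD i 0) i 0 (min 64 (bits.length - i)) 0 =
      min ((suffRuns bits).getD i 0) 64 := by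
  have hlt : i < bits.length := by omega
  have hle : i + 0 + min 64 (bits.length - i) ≤ bits.length := by omega
  rw [innerA_cnt _ bits i 0 _ 0 hle]
  have hcast : ((bits.getD i 0) + ((0 : Nat) : Int)) % 2 = ((bits.drop i).headD 0) % 2 := by
    rw [headD_drop bits i hlt]; push_cast; ring_nf
  simp only [Nat.add_zero, hcast] at *
  rw [cnt_eq, suffRuns_getD]
  have hb := Rr_bounds (bits.drop i)
  rw [List.length_drop] at hb
  have h1 : ((min 64 (bits.length - i) : Nat) : Int) = min 64 ((bits.length : Int) - i) := by
    push_cast; omega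
  omega

-- ===== VERDICT (by name: the statement is the Claim_ definition above) =====
theorem find_preamble_spec : Claim_equal_find_preamble := by
  intro bits _
  unfold Spec_find_preamble find_preamble find_preamble_alt
  dsimp only
  apply List.foldl_ext
  intro st i hi
  have hi' : i < bits.length - 16 := List.mem_range.mp hi
  rw [run_eq bits i hi']
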